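-- pv_equiv track=rewrite | github.com/NoHaxUS/rochasistemas | bet_bola/updater/get_markets.py | get_translated_cotation_with_header_goals
-- ===== SOURCE A (Python) =====
-- def get_translated_cotation_with_header_goals(cotation_name):
--     TRANSLATE_TABLE = {
--         'Over': 'Acima',
--         'Under':'Abaixo',
--         'Home':'Casa',
--         'Away':'Fora',
--         'Score Draw': 'Empate',
--         'No Goal': 'Nenhum Gol'
--     }
--
--     cotation_translated = cotation_name.strip()
--     for header in TRANSLATE_TABLE.keys():
--         cotation_translated = cotation_translated.replace(header, TRANSLATE_TABLE.get(header, header))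
--     return cotation_translated
-- ===== SOURCE B (Python) =====
-- def get_translated_cotation_with_header_goals(cotation_name):
--     TABLE = [
--         ('Over', 'Acima'),
--         ('Under', 'Abaixo'),
--         ('Home', 'Casa'),
--         ('Away', 'Fora'),
--         ('Score Draw', 'Empate'),
--         ('No Goal', 'Nenhum Gol'),
--     ]
--     s = cotation_name.strip()
--     out = []
--     i = 0
--     n = len(s)
--     while i < n:
--         for key, val in TABLE:
--             if s.startswith(key, i):
--                 out.append(val)
--                 i += len(key)
--                 break
--         else:
--             out.append(s[i])
--             i += 1
--     return ''.join(out)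
-- ===== Notes on version B (the rewrite author's own statement) =====
-- stated objective: alternative
-- what changed: Replaced six sequential full-string .replace passes (one per table key) by a single left-to-right scan that at each position matches the six keys in table order and emits the translation; equivalence rests on the keys being mutually non-overlapping and the values containing no keys.
import Mathlib
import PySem

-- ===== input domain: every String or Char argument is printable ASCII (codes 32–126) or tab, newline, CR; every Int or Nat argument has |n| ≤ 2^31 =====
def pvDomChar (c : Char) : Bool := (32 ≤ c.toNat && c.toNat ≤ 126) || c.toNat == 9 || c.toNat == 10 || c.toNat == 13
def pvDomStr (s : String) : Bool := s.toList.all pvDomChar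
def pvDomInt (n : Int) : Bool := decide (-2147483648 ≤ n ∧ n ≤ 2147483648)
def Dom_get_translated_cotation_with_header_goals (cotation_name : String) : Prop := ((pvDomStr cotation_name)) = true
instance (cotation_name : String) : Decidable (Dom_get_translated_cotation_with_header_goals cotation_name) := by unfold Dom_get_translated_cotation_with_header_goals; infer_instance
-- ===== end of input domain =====

-- B replaces A's six sequential full-string .replace passes by one left-to-right scan
-- matching the six keys at each position (objective: alternative, same cost).

-- ===== PORT A =====
def get_translated_cotation_with_header_goals (cotation_name : String) : String :=
  let translate_table : PySem.Dict String String :=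
    PySem.Dict.ofList [("Over", "Acima"), ("Under", "Abaixo"), ("Home", "Casa"),
      ("Away", "Fora"), ("Score Draw", "Empate"), ("No Goal", "Nenhum Gol")]
  translate_table.keys.foldl
    (fun cotation_translated header =>
      PySem.Str.replace cotation_translated header (translate_table.getD header header))
    (PySem.Str.strip cotation_name)

-- ===== PORT B =====
-- Source B's TABLE, as (key, value) char lists
def pvTable : List (List Char × List Char) :=
  [("Over".toList, "Acima".toList), ("Under".toList, "Abaixo".toList),
   ("Home".toList, "Casa".toList), ("Away".toList, "Fora".toList),
   ("Score Draw".toList, "Empate".toList), ("No Goal".toList, "Nenhum Gol".toList)]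

-- Source B's while loop: at each position try the keys in table order (find-first = the
-- for/else), emit the value and skip the key on a hit, else copy one character.
-- (!p.1.isEmpty is a totality guard only; every key of pvTable is nonempty.)
def pvScan (ps : List (List Char × List Char)) : List Char → List Char
  | [] => []
  | c :: t =>
    match h : ps.find? (fun p => !p.1.isEmpty && p.1.isPrefixOf (c :: t)) with
    | some p => p.2 ++ pvScan ps ((c :: t).drop p.1.length)
    | none => c :: pvScan ps t
termination_by cs => cs.length
decreasing_by
  · have h1 := List.find?_some h
    simp only [Bool.and_eq_true, Bool.not_eq_true', List.isEmpty_eq_false_iff,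
      List.isPrefixOf_iff_prefix] at h1
    have h2 : p.1.length ≠ 0 := by
      simpa [List.length_eq_zero_iff] using h1.1
    simp only [List.length_drop, List.length_cons]
    omega
  · simp

def get_translated_cotation_with_header_goals_alt (cotation_name : String) : String :=
  String.ofList (pvScan pvTable (PySem.Chars.strip cotation_name.toList))

-- ===== PRECONDITION & SPEC =====
def Spec_get_translated_cotation_with_header_goals (cotation_name : String) (out : String) : Prop := out = get_translated_cotation_with_header_goals_alt cotation_name
instance (cotation_name : String) (out : String) : Decidable (Spec_get_translated_cotation_with_header_goals cotation_name out) := by unfold Spec_get_translated_cotation_with_header_goals; infer_instance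

-- ===== CLAIM (what is proved, stated in full; the proofs are below) =====
def Claim_equal_get_translated_cotation_with_header_goals : Prop := ∀ (cotation_name : String), Dom_get_translated_cotation_with_header_goals cotation_name → Spec_get_translated_cotation_with_header_goals cotation_name (get_translated_cotation_with_header_goals cotation_name)

-- ===== LEMMAS AND PROOFS =====

lemma pvScan_nil (ps : List (List Char × List Char)) : pvScan ps [] = [] := by
  rw [pvScan]

lemma pvScan_cons_some {ps : List (List Char × List Char)} {c : Char} {t : List Char}
    {p : List Char × List Char}
    (h : ps.find? (fun p => !p.1.isEmpty && p.1.isPrefixOf (c :: t)) = some p) :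
    pvScan ps (c :: t) = p.2 ++ pvScan ps ((c :: t).drop p.1.length) := by
  rw [pvScan, h]

lemma pvScan_cons_none {ps : List (List Char × List Char)} {c : Char} {t : List Char}
    (h : ps.find? (fun p => !p.1.isEmpty && p.1.isPrefixOf (c :: t)) = none) :
    pvScan ps (c :: t) = c :: pvScan ps t := by
  rw [pvScan, h]

-- a cannot begin t ++ x when a and t are prefix-incomparable
lemma pv_no_prefix_append {t a x : List Char} (h1 : ¬ t <+: a) (h2 : ¬ a <+: t) :
    ¬ a <+: t ++ x := by
  intro h
  rcases List.prefix_or_prefix_of_prefix h (List.prefix_append t x) with h' | h'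
  · exact h2 h'
  · exact h1 h'

-- if no key of ps can start inside u (spanning into anything), the scan copies u through
lemma pv_pass (ps : List (List Char × List Char)) :
    ∀ (u x : List Char),
      (∀ t ∈ u.tails, t ≠ [] → ∀ p ∈ ps, ¬ t <+: p.1 ∧ ¬ p.1 <+: t) →
      pvScan ps (u ++ x) = u ++ pvScan ps x := by
  intro u
  induction u with
  | nil => intro x _; simp
  | cons c u' ih =>
    intro x hu
    have hnone : List.find? (fun p => !p.1.isEmpty && p.1.isPrefixOf (c :: (u' ++ x))) ps = none := by
      apply List.find?_eq_none.mpr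
      intro p hp
      simp only [Bool.and_eq_true, Bool.not_eq_true', List.isEmpty_eq_false_iff,
        List.isPrefixOf_iff_prefix]
      rintro ⟨-, hpre⟩
      have hx := hu (c :: u') (by simp [List.mem_tails]) (by simp) p hp
      exact pv_no_prefix_append hx.1 hx.2 (by simpa using hpre)
    have : pvScan ps (c :: (u' ++ x)) = c :: pvScan ps (u' ++ x) := pvScan_cons_none hnone
    rw [show (c :: u') ++ x = c :: (u' ++ x) from rfl, this,
      ih x (fun t ht htne p hp => hu t (by
        rw [List.mem_tails] at ht ⊢; exact ht.trans (List.suffix_cons c u')) htne p hp)]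
    simp

-- a nonempty suffix w of k can begin the scan's output only where it begins the input
lemma pv_front (ps : List (List Char × List Char)) (k : List Char)
    (hk : ∀ t ∈ k.tails, t ≠ [] → ∀ p ∈ ps, ¬ t <+: p.2 ∧ ¬ p.2 <+: t) :
    ∀ (n : Nat) (cs : List Char), cs.length ≤ n → ∀ w ∈ k.tails, w ≠ [] →
      w <+: pvScan ps cs → w <+: cs := by
  intro n
  induction n with
  | zero =>
    intro cs hcs w hw hwne hpre
    have : cs = [] := List.length_eq_zero_iff.mp (Nat.le_zero.mp hcs)
    subst this
    rw [pvScan_nil] at hpre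
    exact absurd (List.prefix_nil.mp hpre) hwne
  | succ n ih =>
    intro cs hcs w hw hwne hpre
    cases cs with
    | nil =>
      rw [pvScan_nil] at hpre
      exact absurd (List.prefix_nil.mp hpre) hwne
    | cons c t =>
      cases hfind : List.find? (fun p => !p.1.isEmpty && p.1.isPrefixOf (c :: t)) ps with
      | some p =>
        rw [pvScan_cons_some hfind] at hpre
        have hx := hk w hw hwne p (List.mem_of_find?_eq_some hfind)
        exact absurd hpre (pv_no_prefix_append hx.2 hx.1)
      | none =>
        rw [pvScan_cons_none hfind] at hpre
        cases w with
        | nil => exact absurd rfl hwne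
        | cons w0 w' =>
          obtain ⟨rfl, hw'⟩ := List.cons_prefix_cons.mp hpre
          cases hw'e : w' with
          | nil => simp
          | cons a b =>
            subst hw'e
            have hsuf : (a :: b) <:+ k := by
              have h1 : (a :: b) <:+ (w0 :: a :: b) := List.suffix_cons w0 (a :: b)
              exact h1.trans ((List.mem_tails _ _).mp hw)
            have := ih t (by simpa using Nat.lt_succ_iff.mp (by simpa using hcs)) (a :: b)
              ((List.mem_tails _ _).mpr hsuf) (by simp) hw'
            exact List.cons_prefix_cons.mpr ⟨rfl, this⟩

lemma pvScan_head_some {ps : List (List Char × List Char)} {cs : List Char}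
    {p : List Char × List Char} (hcs : cs ≠ [])
    (h : cs ≠ [] → List.find? (fun q => !q.1.isEmpty && q.1.isPrefixOf cs) ps = some p) :
    pvScan ps cs = p.2 ++ pvScan ps (cs.drop p.1.length) := by
  cases cs with
  | nil => exact absurd rfl hcs
  | cons c t => exact pvScan_cons_some (h (by simp))

-- fusing one more single-key scan into a multi-key scan
lemma pv_fusion (ps : List (List Char × List Char)) (k v : List Char) (hk : k ≠ [])
    (hb : ∀ p ∈ ps, ∀ t ∈ p.2.tails, t ≠ [] → ¬ t <+: k ∧ ¬ k <+: t)
    (hc : ∀ t ∈ k.tails, t ≠ [] → ∀ p ∈ ps, ¬ t <+: p.1 ∧ ¬ p.1 <+: t)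
    (hf : ∀ t ∈ k.tails, t ≠ [] → ∀ p ∈ ps, ¬ t <+: p.2 ∧ ¬ p.2 <+: t) :
    ∀ (n : Nat) (cs : List Char), cs.length ≤ n →
      pvScan [(k, v)] (pvScan ps cs) = pvScan (ps ++ [(k, v)]) cs := by
  intro n
  induction n with
  | zero =>
    intro cs hcs
    have : cs = [] := List.length_eq_zero_iff.mp (Nat.le_zero.mp hcs)
    subst this
    simp [pvScan_nil]
  | succ n ih =>
    intro cs hcs
    by_cases hpre : k <+: cs
    · obtain ⟨rest, rfl⟩ := hpre
      have hkcons : k ++ rest ≠ [] := by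
        cases k with | nil => exact absurd rfl hk | cons a b => simp
      have hpass : pvScan ps (k ++ rest) = k ++ pvScan ps rest := pv_pass ps k rest hc
      have hnone_ps : List.find? (fun q => !q.1.isEmpty && q.1.isPrefixOf (k ++ rest)) ps = none := by
        apply List.find?_eq_none.mpr
        intro p hp
        simp only [Bool.and_eq_true, Bool.not_eq_true', List.isEmpty_eq_false_iff,
          List.isPrefixOf_iff_prefix]
        rintro ⟨-, hpre⟩
        have hx := hc k (by simp [List.mem_tails]) hk p hp
        exact pv_no_prefix_append hx.1 hx.2 hpre
      have hfind1 : ∀ (x : List Char), (k ++ x) ≠ [] →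
          List.find? (fun q => !q.1.isEmpty && q.1.isPrefixOf (k ++ x)) [(k, v)] = some (k, v) := by
        intro x _
        have : (!k.isEmpty && k.isPrefixOf (k ++ x)) = true := by
          simp [List.isPrefixOf_iff_prefix, List.isEmpty_eq_false_iff, hk]
        simp [List.find?, this]
      have hL : pvScan [(k, v)] (k ++ pvScan ps rest)
          = v ++ pvScan [(k, v)] (pvScan ps rest) := by
        rw [pvScan_head_some (by
          cases k with | nil => exact absurd rfl hk | cons a b => simp)
          (fun _ => hfind1 (pvScan ps rest) (by
            cases k with | nil => exact absurd rfl hk | cons a b => simp))]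
        rw [List.drop_left]
      have hfindR : List.find? (fun q => !q.1.isEmpty && q.1.isPrefixOf (k ++ rest))
          (ps ++ [(k, v)]) = some (k, v) := by
        rw [List.find?_append, hnone_ps]
        simp only [Option.none_or]
        exact hfind1 rest hkcons
      have hR : pvScan (ps ++ [(k, v)]) (k ++ rest)
          = v ++ pvScan (ps ++ [(k, v)]) rest := by
        rw [pvScan_head_some hkcons (fun _ => hfindR), List.drop_left]
      have hlen : rest.length ≤ n := by
        rw [List.length_append] at hcs
        have hk1 : 1 ≤ k.length := by
          cases k with | nil => exact absurd rfl hk | cons a b => simp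
        omega
      rw [hpass, hL, hR, ih rest hlen]
    · cases cs with
      | nil => simp [pvScan_nil]
      | cons c t =>
        cases hfind : List.find? (fun q => !q.1.isEmpty && q.1.isPrefixOf (c :: t)) ps with
        | some p =>
          have hpm := List.mem_of_find?_eq_some hfind
          have hpp := List.find?_some hfind
          simp only [Bool.and_eq_true, Bool.not_eq_true', List.isEmpty_eq_false_iff,
            List.isPrefixOf_iff_prefix] at hpp
          have hplen : 1 ≤ p.1.length := by
            cases hq : p.1 with
            | nil => exact absurd hq hpp.1
            | cons a b => simp
          have hrest : ((c :: t).drop p.1.length).length ≤ n := by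
            simp only [List.length_drop, List.length_cons]
            have : t.length + 1 ≤ n + 1 := by simpa using hcs
            omega
          have hpassv : pvScan [(k, v)] (p.2 ++ pvScan ps ((c :: t).drop p.1.length))
              = p.2 ++ pvScan [(k, v)] (pvScan ps ((c :: t).drop p.1.length)) := by
            apply pv_pass
            intro t' ht' htne q hq
            have : q = (k, v) := by simpa using hq
            subst this
            exact hb p hpm t' ht' htne
          have hfindR : List.find? (fun q => !q.1.isEmpty && q.1.isPrefixOf (c :: t))
              (ps ++ [(k, v)]) = some p := by
            rw [List.find?_append, hfind]; rfl
          rw [pvScan_cons_some hfind, hpassv, ih _ hrest, pvScan_cons_some hfindR]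
        | none =>
          have hscan : pvScan ps (c :: t) = c :: pvScan ps t := pvScan_cons_none hfind
          have hnotk : ¬ k <+: (c :: pvScan ps t) := by
            intro hkp
            have : k <+: pvScan ps (c :: t) := by rw [hscan]; exact hkp
            exact hpre (pv_front ps k hf (c :: t).length (c :: t) le_rfl k
              (by simp [List.mem_tails]) hk this)
          have hfind1 : List.find?
              (fun q => !q.1.isEmpty && q.1.isPrefixOf (c :: pvScan ps t)) [(k, v)] = none := by
            apply List.find?_eq_none.mpr
            intro q hq
            have : q = (k, v) := by simpa using hq
            subst this
            simp only [Bool.and_eq_true, Bool.not_eq_true', List.isEmpty_eq_false_iff,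
              List.isPrefixOf_iff_prefix]
            rintro ⟨-, h⟩
            exact hnotk h
          have hfindR : List.find? (fun q => !q.1.isEmpty && q.1.isPrefixOf (c :: t))
              (ps ++ [(k, v)]) = none := by
            rw [List.find?_append, hfind]
            simp only [Option.none_or]
            apply List.find?_eq_none.mpr
            intro q hq
            have : q = (k, v) := by simpa using hq
            subst this
            simp only [Bool.and_eq_true, Bool.not_eq_true', List.isEmpty_eq_false_iff,
              List.isPrefixOf_iff_prefix]
            rintro ⟨-, h⟩
            exact hpre h
          have hlen : t.length ≤ n := by simpa using Nat.lt_succ_iff.mp (by simpa using hcs)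
          rw [hscan, pvScan_cons_none hfind1, ih t hlen, pvScan_cons_none hfindR]

-- PySem's replace (nonempty pattern) IS the single-key scan
lemma pv_go_eq (old new : List Char) (hold : old ≠ []) :
    ∀ (fuel : Nat) (cs acc : List Char), cs.length ≤ fuel →
      PySem.Chars.replace.go old new fuel cs acc = acc.reverse ++ pvScan [(old, new)] cs := by
  intro fuel
  induction fuel with
  | zero =>
    intro cs acc hcs
    have : cs = [] := List.length_eq_zero_iff.mp (Nat.le_zero.mp hcs)
    subst this
    rw [PySem.Chars.replace.go]
    simp [pvScan_nil]
  | succ n ih =>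
    intro cs acc hcs
    cases cs with
    | nil =>
      rw [PySem.Chars.replace.go]
      · simp [pvScan_nil]
      · omega
    | cons c t =>
      rw [PySem.Chars.replace.go]
      by_cases hp : old.isPrefixOf (c :: t)
      · have hfind : List.find? (fun q => !q.1.isEmpty && q.1.isPrefixOf (c :: t))
            [(old, new)] = some (old, new) := by
          have : (!old.isEmpty && old.isPrefixOf (c :: t)) = true := by
            simp [hp, hold]
          simp [List.find?, this]
        have hplen : 1 ≤ old.length := by
          cases hq : old with
          | nil => exact absurd hq hold
          | cons a b => simp
        have hle : old.length ≤ (c :: t).length :=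
          (List.isPrefixOf_iff_prefix.mp hp).length_le
        have hdlen : ((c :: t).drop old.length).length ≤ n := by
          simp only [List.length_drop, List.length_cons]
          have : t.length + 1 ≤ n + 1 := by simpa using hcs
          omega
        rw [if_pos hp, ih _ _ hdlen, pvScan_cons_some hfind]
        simp
      · have hfind : List.find? (fun q => !q.1.isEmpty && q.1.isPrefixOf (c :: t))
            [(old, new)] = none := by
          apply List.find?_eq_none.mpr
          intro q hq
          have : q = (old, new) := by simpa using hq
          subst this
          simp [hp]
        have hlen : t.length ≤ n := by simpa using Nat.lt_succ_iff.mp (by simpa using hcs)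
        rw [if_neg hp, ih _ _ hlen, pvScan_cons_none hfind]
        simp

lemma pv_replace_eq (cs old new : List Char) (hold : old ≠ []) :
    PySem.Chars.replace cs old new = pvScan [(old, new)] cs := by
  rw [PySem.Chars.replace]
  rw [if_neg (by simp [hold])]
  simpa using pv_go_eq old new hold cs.length cs [] le_rfl

-- the six single-key scans, in A's table order, fuse into the one scan over pvTable
lemma pv_chain (cs : List Char) :
    pvScan [("No Goal".toList, "Nenhum Gol".toList)]
      (pvScan [("Score Draw".toList, "Empate".toList)]
        (pvScan [("Away".toList, "Fora".toList)]
          (pvScan [("Home".toList, "Casa".toList)]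
            (pvScan [("Under".toList, "Abaixo".toList)]
              (pvScan [("Over".toList, "Acima".toList)] cs)))))
    = pvScan pvTable cs := by
  have f2 := pv_fusion [("Over".toList, "Acima".toList)]
    "Under".toList "Abaixo".toList (by decide) (by decide) (by decide) (by decide)
  have f3 := pv_fusion [("Over".toList, "Acima".toList), ("Under".toList, "Abaixo".toList)]
    "Home".toList "Casa".toList (by decide) (by decide) (by decide) (by decide)
  have f4 := pv_fusion [("Over".toList, "Acima".toList), ("Under".toList, "Abaixo".toList),
      ("Home".toList, "Casa".toList)]
    "Away".toList "Fora".toList (by decide) (by decide) (by decide) (by decide)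
  have f5 := pv_fusion [("Over".toList, "Acima".toList), ("Under".toList, "Abaixo".toList),
      ("Home".toList, "Casa".toList), ("Away".toList, "Fora".toList)]
    "Score Draw".toList "Empate".toList (by decide) (by decide) (by decide) (by decide)
  have f6 := pv_fusion [("Over".toList, "Acima".toList), ("Under".toList, "Abaixo".toList),
      ("Home".toList, "Casa".toList), ("Away".toList, "Fora".toList),
      ("Score Draw".toList, "Empate".toList)]
    "No Goal".toList "Nenhum Gol".toList (by decide) (by decide) (by decide) (by decide)
  rw [f2 _ _ le_rfl]
  simp only [List.cons_append, List.nil_append]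
  rw [f3 _ _ le_rfl]
  simp only [List.cons_append, List.nil_append]
  rw [f4 _ _ le_rfl]
  simp only [List.cons_append, List.nil_append]
  rw [f5 _ _ le_rfl]
  simp only [List.cons_append, List.nil_append]
  rw [f6 _ _ le_rfl]
  rfl

-- A's literal dict/fold shape, unfolded
lemma pv_A_unfold (s : String) :
    get_translated_cotation_with_header_goals s
      = PySem.Str.replace (PySem.Str.replace (PySem.Str.replace (PySem.Str.replace
          (PySem.Str.replace (PySem.Str.replace (PySem.Str.strip s)
            "Over" "Acima") "Under" "Abaixo") "Home" "Casa") "Away" "Fora")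
          "Score Draw" "Empate") "No Goal" "Nenhum Gol" := rfl

-- ===== VERDICT (by name: the statement is the Claim_ definition above) =====
theorem get_translated_cotation_with_header_goals_spec : Claim_equal_get_translated_cotation_with_header_goals := by
  intro s _
  unfold Spec_get_translated_cotation_with_header_goals
  apply String.ext
  rw [pv_A_unfold]
  simp only [PySem.Str.toList_replace, PySem.Str.toList_strip]
  rw [pv_replace_eq _ _ _ (by decide), pv_replace_eq _ _ _ (by decide),
    pv_replace_eq _ _ _ (by decide), pv_replace_eq _ _ _ (by decide),
    pv_replace_eq _ _ _ (by decide), pv_replace_eq _ _ _ (by decide)]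
  rw [pv_chain]
  simp [get_translated_cotation_with_header_goals_alt, String.toList_ofList]
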